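-- pv_equiv track=rewrite | github.com/lfabris-mhpc/Foundations_of_HPC_2020 | exercises/blur/hybrid/create_csvs.py | balanced_divisors
-- ===== SOURCE A (Python) =====
-- def balanced_divisors(n):
--     a = n
--     diff = n - 1
--     for b in range(1, n + 1):
--         if n % b == 0:
--             d = abs(n // b - b)
--             if d < diff:
--                 a = b
--                 diff = d
--     b = n // a
--     return max(a, b), min(a, b)
-- ===== SOURCE B (Python) =====
-- def balanced_divisors(n):
--     a = n
--     i = 1
--     while i * i <= n:
--         if n % i == 0:
--             a = i
--         i += 1
--     b = n // a
--     return max(a, b), min(a, b)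
-- ===== Notes on version B (the rewrite author's own statement) =====
-- stated objective: faster
-- what changed: B scans divisor candidates only while i*i <= n, keeping the last divisor found (the largest divisor <= sqrt(n)) and pairing it with its cofactor, instead of A's full scan of all n candidates minimizing |n//b - b| with a tracked best difference.
-- outside the precondition, e.g. on balanced_divisors(0): A raises ZeroDivisionError, B raises ZeroDivisionError
import Mathlib
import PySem

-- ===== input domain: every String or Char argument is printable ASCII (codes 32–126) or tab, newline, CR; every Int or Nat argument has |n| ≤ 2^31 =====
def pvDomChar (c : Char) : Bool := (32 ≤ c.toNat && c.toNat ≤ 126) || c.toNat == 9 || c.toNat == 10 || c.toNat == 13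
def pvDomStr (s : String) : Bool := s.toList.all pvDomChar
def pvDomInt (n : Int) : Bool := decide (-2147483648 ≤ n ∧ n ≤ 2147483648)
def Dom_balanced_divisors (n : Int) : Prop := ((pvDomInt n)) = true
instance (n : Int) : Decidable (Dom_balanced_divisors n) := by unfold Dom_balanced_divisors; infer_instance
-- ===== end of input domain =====

-- B replaces A's full scan of 1..n (minimizing |n//b - b|) by a scan of candidates with i*i <= n
-- keeping the last divisor found; objective: faster (O(sqrt n) candidates instead of O(n)).

-- ===== PORT A =====
def balanced_divisors (n : Int) : List Int :=
  let st := (PySem.List.pyRange 1 (n + 1)).foldl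
    (fun (st : Int × Int) b =>
      if PySem.Int.mod n b = 0 then
        let d := |PySem.Int.floordiv n b - b|
        if d < st.2 then (b, d) else st
      else st) (n, n - 1)
  let b := PySem.Int.floordiv n st.1
  [max st.1 b, min st.1 b]

-- ===== PORT B =====
-- the while loop of Source B (the '1 ≤ i' conjunct only makes the recursion well-founded;
-- the entry point calls it with i = 1, so it is always true on reachable states)
def bdAltLoop (n i a : Int) : Int :=
  if h : 1 ≤ i ∧ i * i ≤ n then
    bdAltLoop n (i + 1) (if PySem.Int.mod n i = 0 then i else a)
  else a
termination_by (n + 1 - i).toNat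
decreasing_by
  have hii : i ≤ i * i := by nlinarith [h.1]
  have hin := h.2
  omega

def balanced_divisors_alt (n : Int) : List Int :=
  let a := bdAltLoop n 1 n
  let b := PySem.Int.floordiv n a
  [max a b, min a b]

-- ===== PRECONDITION & SPEC =====
-- Pre_ excludes only n = 0, where A (and B) raise ZeroDivisionError on n // a with a = 0.
def Pre_balanced_divisors (n : Int) : Prop := n ≠ 0
instance (n : Int) : Decidable (Pre_balanced_divisors n) := by unfold Pre_balanced_divisors; infer_instance
def pvWitness_balanced_divisors : Int := (12)

def Spec_balanced_divisors (n : Int) (out : List Int) : Prop := out = balanced_divisors_alt n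
instance (n : Int) (out : List Int) : Decidable (Spec_balanced_divisors n out) := by unfold Spec_balanced_divisors; infer_instance

-- ===== CLAIM (what is proved, stated in full; the proofs are below) =====
def Claim_equal_balanced_divisors : Prop := ∀ (n : Int), Dom_balanced_divisors n → Pre_balanced_divisors n → Spec_balanced_divisors n (balanced_divisors n)

-- ===== LEMMAS AND PROOFS =====

-- f(b) = |n//b - b|, with exact division written as Int ediv (valid for divisors b ≥ 1)
def bdF (n b : Int) : Int := |n / b - b|

-- A's loop body with mod/floordiv rewritten for positive b (used only under 1 ≤ b)
def bdStep (n : Int) (st : Int × Int) (b : Int) : Int × Int :=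
  if b ∣ n then (if bdF n b < st.2 then (b, bdF n b) else st) else st

lemma bd_div_pos (n d : Int) (hn : 1 ≤ n) (hd : 1 ≤ d) (hdvd : d ∣ n) :
    1 ≤ n / d ∧ n / d * d = n := by
  have he : n / d * d = n := Int.ediv_mul_cancel hdvd
  constructor
  · nlinarith
  · exact he

lemma bd_antitone (n b c : Int) (hn : 1 ≤ n) (hb : 1 ≤ b) (hbc : b < c)
    (h1 : b ∣ n) (h2 : c ∣ n) : n / c < n / b := by
  obtain ⟨hq1, he1⟩ := bd_div_pos n b hn hb h1
  obtain ⟨hq2, he2⟩ := bd_div_pos n c hn (by omega) h2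
  nlinarith

-- n/d ≥ d for a divisor d with d*d ≤ n, and the abs in bdF disappears
lemma bd_f_eq (n d : Int) (hn : 1 ≤ n) (hd : 1 ≤ d) (hdvd : d ∣ n) (hsq : d * d ≤ n) :
    d ≤ n / d ∧ bdF n d = n / d - d := by
  obtain ⟨hq, he⟩ := bd_div_pos n d hn hd hdvd
  have hle : d ≤ n / d := by nlinarith
  exact ⟨hle, by simp [bdF, abs_of_nonneg, hle]⟩

-- invariant of B's loop: the result is the largest divisor r with r*r ≤ n
lemma bdAltLoop_spec (n : Int) (hn : 1 ≤ n) :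
    ∀ (k : Nat) (i a : Int), (n + 1 - i).toNat ≤ k → 1 ≤ i → a ∣ n → 1 ≤ a → a * a ≤ n →
    (∀ j, a < j → j < i → j * j ≤ n → ¬ j ∣ n) →
    bdAltLoop n i a ∣ n ∧ 1 ≤ bdAltLoop n i a ∧ bdAltLoop n i a * bdAltLoop n i a ≤ n ∧
      (∀ j, bdAltLoop n i a < j → j * j ≤ n → ¬ j ∣ n) := by
  intro k
  induction k with
  | zero =>
    intro i a hk hi h1 h2 h3 h4
    have hni : n + 1 ≤ i := by omega
    rw [bdAltLoop]
    have hguard : ¬ (1 ≤ i ∧ i * i ≤ n) := by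
      rintro ⟨-, hii⟩; nlinarith
    rw [dif_neg hguard]
    refine ⟨h1, h2, h3, fun j hj1 hj2 => h4 j hj1 (by nlinarith) hj2⟩
  | succ k ih =>
    intro i a hk hi h1 h2 h3 h4
    rw [bdAltLoop]
    by_cases hguard : 1 ≤ i ∧ i * i ≤ n
    · rw [dif_pos hguard]
      have hiin : i ≤ n := by nlinarith [hguard.2]
      have hk' : (n + 1 - (i + 1)).toNat ≤ k := by omega
      by_cases hdi : PySem.Int.mod n i = 0
      · have hdvd : i ∣ n := (PySem.Int.mod_eq_zero_iff_dvd n i).mp hdi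
        rw [if_pos hdi]
        exact ih (i + 1) i hk' (by omega) hdvd hguard.1 hguard.2
          (fun j hj1 hj2 _ _ => by omega)
      · rw [if_neg hdi]
        refine ih (i + 1) a hk' (by omega) h1 h2 h3 ?_
        intro j hj1 hj2 hj3 hj4
        by_cases hji : j = i
        · exact hdi (by rw [PySem.Int.mod_eq_zero_iff_dvd]; exact hji ▸ hj4)
        · exact h4 j hj1 (by omega) hj3 hj4
    · rw [dif_neg hguard]
      have hii : n < i * i := by
        rcases not_and_or.mp hguard with h | h
        · omega
        · omega
      refine ⟨h1, h2, h3, fun j hj1 hj2 hj3 => ?_⟩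
      by_cases hji : j < i
      · exact h4 j hj1 hji hj2 hj3
      · have hji' : i ≤ j := not_lt.mp hji
        have : i * i ≤ j * j := by nlinarith
        nlinarith

lemma bdAstar (n : Int) (hn : 1 ≤ n) :
    bdAltLoop n 1 n ∣ n ∧ 1 ≤ bdAltLoop n 1 n ∧
      (bdAltLoop n 1 n) * (bdAltLoop n 1 n) ≤ n ∧
      (∀ j, bdAltLoop n 1 n < j → j * j ≤ n → ¬ j ∣ n) := by
  have hmod : PySem.Int.mod n 1 = 0 := by
    rw [PySem.Int.mod_eq_zero_iff_dvd]; exact one_dvd n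
  have hstep : bdAltLoop n 1 n = bdAltLoop n 2 1 := by
    rw [bdAltLoop, dif_pos ⟨le_refl 1, by nlinarith⟩, if_pos hmod]
    norm_num
  rw [hstep]
  exact bdAltLoop_spec n hn (n + 1 - 2).toNat 2 1 (le_refl _) (by omega) (one_dvd n)
    (by omega) (by nlinarith) (fun j hj1 hj2 _ _ => by omega)

-- the invariant of A's fold, phrased against the largest divisor r with r*r ≤ n
lemma bdAfold_inv (n r : Int) (hn : 1 ≤ n) (hr1 : r ∣ n) (hr2 : 1 ≤ r) (hr3 : r * r ≤ n)
    (hr4 : ∀ j, r < j → j * j ≤ n → ¬ j ∣ n) :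
    ∀ (m : Nat), (m : Int) ≤ n →
      (if (m : Int) < r then
        (PySem.List.pyRange 1 ((m : Int) + 1)).foldl (bdStep n) (n, n - 1) = (n, n - 1) ∨
          (((PySem.List.pyRange 1 ((m : Int) + 1)).foldl (bdStep n) (n, n - 1)).1 ∣ n ∧
           2 ≤ ((PySem.List.pyRange 1 ((m : Int) + 1)).foldl (bdStep n) (n, n - 1)).1 ∧
           ((PySem.List.pyRange 1 ((m : Int) + 1)).foldl (bdStep n) (n, n - 1)).1 ≤ (m : Int) ∧
           ((PySem.List.pyRange 1 ((m : Int) + 1)).foldl (bdStep n) (n, n - 1)).2 =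
             bdF n ((PySem.List.pyRange 1 ((m : Int) + 1)).foldl (bdStep n) (n, n - 1)).1)
      else if r = 1 then
        (PySem.List.pyRange 1 ((m : Int) + 1)).foldl (bdStep n) (n, n - 1) = (n, n - 1)
      else
        (PySem.List.pyRange 1 ((m : Int) + 1)).foldl (bdStep n) (n, n - 1) = (r, bdF n r)) := by
  intro m
  induction m with
  | zero =>
    intro _
    have h0 : PySem.List.pyRange 1 (((0 : Nat) : Int) + 1) = [] := by
      refine List.eq_nil_iff_forall_not_mem.mpr fun x hx => ?_
      rw [PySem.List.mem_pyRange_one] at hx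
      omega
    rw [h0]
    simp only [List.foldl_nil]
    have h0r : ((0 : Nat) : Int) < r := by push_cast; omega
    rw [if_pos h0r]
    exact Or.inl trivial
  | succ m ihm =>
    intro hm
    have hm' : (m : Int) ≤ n := by push_cast at hm ⊢; omega
    have ih := ihm hm'
    have hc0 : (0 : Int) ≤ (m : Int) := Int.natCast_nonneg m
    have hcn : (m : Int) + 1 ≤ n := by push_cast at hm; omega
    have hrange : PySem.List.pyRange 1 (((m + 1 : Nat) : Int) + 1) =
        PySem.List.pyRange 1 ((m : Int) + 1) ++ [(m : Int) + 1] := by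
      push_cast
      exact PySem.List.pyRange_one_succ_right (by omega)
    rw [hrange, List.foldl_append]
    simp only [List.foldl_cons, List.foldl_nil]
    set st := (PySem.List.pyRange 1 ((m : Int) + 1)).foldl (bdStep n) (n, n - 1) with hst
    set c : Int := (m : Int) + 1 with hcdef
    have hcast : ((m + 1 : Nat) : Int) = c := by push_cast; rfl
    rw [hcast]
    rcases lt_trichotomy c r with hcr | hcr | hcr
    · -- c < r : stay in the "before r" region
      rw [if_pos (show (m : Int) < r by omega)] at ih
      rw [if_pos hcr]
      by_cases hdc : c ∣ n
      · by_cases hupd : bdF n c < st.2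
        · have hres : bdStep n st c = (c, bdF n c) := by simp [bdStep, hdc, hupd]
          have h2c : 2 ≤ c := by
            by_contra hlt
            have hc1 : c = 1 := by omega
            have hf1 : bdF n 1 = n - 1 := by
              simp only [bdF, Int.ediv_one]
              rw [abs_of_nonneg (by omega)]
            rcases ih with h | h
            · rw [h, hc1, hf1] at hupd
              simp at hupd
            · omega
          rw [hres]
          exact Or.inr ⟨hdc, h2c, le_refl c, rfl⟩
        · have hres : bdStep n st c = st := by simp [bdStep, hdc, hupd]
          rw [hres]
          rcases ih with h | h
          · exact Or.inl h
          · exact Or.inr ⟨h.1, h.2.1, by omega, h.2.2.2⟩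
      · have hres : bdStep n st c = st := by simp [bdStep, hdc]
        rw [hres]
        rcases ih with h | h
        · exact Or.inl h
        · exact Or.inr ⟨h.1, h.2.1, by omega, h.2.2.2⟩
    · -- c = r : the update fires (unless r = 1, where nothing ever fires)
      rw [if_pos (show (m : Int) < r by omega)] at ih
      rw [if_neg (show ¬ c < r by omega)]
      by_cases hre : r = 1
      · rw [if_pos hre]
        have hstv : st = (n, n - 1) := by
          rcases ih with h | h
          · exact h
          · exfalso; omega
        have hfc : bdF n c = n - 1 := by
          rw [hcr, hre]
          simp only [bdF, Int.ediv_one]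
          rw [abs_of_nonneg (by omega)]
        have hno : ¬ (bdF n c < n - 1) := by rw [hfc]; omega
        have hdc : c ∣ n := by rw [hcr, hre]; exact one_dvd n
        rw [hstv]
        simp [bdStep, hdc, hno]
      · rw [if_neg hre]
        have hr2' : 2 ≤ r := by omega
        obtain ⟨hrp, hfr⟩ := bd_f_eq n r hn hr2 hr1 hr3
        obtain ⟨hp1, hpe⟩ := bd_div_pos n r hn hr2 hr1
        have hlt : bdF n c < st.2 := by
          rw [hcr]
          rcases ih with h | h
          · rw [h, hfr]
            nlinarith
          · obtain ⟨hbd, hb2, hbm, hbf⟩ := h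
            have hbr : st.1 < r := by omega
            have hbsq : st.1 * st.1 ≤ n := by nlinarith
            obtain ⟨hbp, hfb⟩ := bd_f_eq n st.1 hn (by omega) hbd hbsq
            have hanti : n / r < n / st.1 := bd_antitone n st.1 r hn (by omega) hbr hbd hr1
            rw [hbf, hfb, hfr]
            omega
        have hdc : c ∣ n := hcr ▸ hr1
        have hres : bdStep n st c = (c, bdF n c) := by simp [bdStep, hdc, hlt]
        rw [hres, hcr]
    · -- r < c : no divisor beyond r with square ≤ n can improve; the state is frozen
      rw [if_neg (show ¬ (m : Int) < r by omega)] at ih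
      rw [if_neg (show ¬ c < r by omega)]
      suffices hres : bdStep n st c = st by rw [hres]; exact ih
      by_cases hdc : c ∣ n
      · have hcsq : ¬ (c * c ≤ n) := fun h => hr4 c hcr h hdc
        obtain ⟨hq1, hqe⟩ := bd_div_pos n c hn (by omega) hdc
        have hqc : n / c < c := by nlinarith
        have hqdvd : (n / c) ∣ n := ⟨c, hqe.symm⟩
        have hqsq : (n / c) * (n / c) ≤ n := by nlinarith
        have hqr : n / c ≤ r := by
          by_contra hlt
          exact hr4 (n / c) (not_le.mp hlt) hqsq hqdvd
        have hfc : bdF n c = c - n / c := by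
          simp only [bdF]
          rw [abs_of_nonpos (by omega)]
          ring
        by_cases hre : r = 1
        · rw [if_pos hre] at ih
          have hqq : n / c = 1 := by omega
          have hcn' : c = n := by rw [hqq] at hqe; omega
          have hno : ¬ (bdF n c < st.2) := by rw [ih, hfc]; omega
          simp [bdStep, hdc, hno]
        · rw [if_neg hre] at ih
          obtain ⟨hrp, hfr⟩ := bd_f_eq n r hn hr2 hr1 hr3
          obtain ⟨hp1, hpe⟩ := bd_div_pos n r hn hr2 hr1
          have hcp : n / r ≤ c := by nlinarith
          have hno : ¬ (bdF n c < st.2) := by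
            rw [ih, hfc, hfr]
            simp only [not_lt]
            omega
          simp [bdStep, hdc, hno]
      · simp [bdStep, hdc]

-- both programs agree for 1 ≤ n
lemma bd_pos (n : Int) (hn : 1 ≤ n) : balanced_divisors n = balanced_divisors_alt n := by
  obtain ⟨hr1, hr2, hr3, hr4⟩ := bdAstar n hn
  have hfold : (PySem.List.pyRange 1 (n + 1)).foldl
      (fun (st : Int × Int) b =>
        if PySem.Int.mod n b = 0 then
          let d := |PySem.Int.floordiv n b - b|
          if d < st.2 then (b, d) else st
        else st) (n, n - 1) =
      (PySem.List.pyRange 1 (n + 1)).foldl (bdStep n) (n, n - 1) := by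
    refine PySem.List.foldl_congr_mem _ _ _ _ fun acc x hx => ?_
    rw [PySem.List.mem_pyRange_one] at hx
    simp [bdStep, bdF, PySem.Int.mod_eq_zero_iff_dvd,
      PySem.Int.floordiv_eq_ediv_of_pos (show (0 : Int) < x by omega)]
  have hmn : ((n.toNat : Int)) = n := Int.toNat_of_nonneg (by omega)
  have hinv := bdAfold_inv n (bdAltLoop n 1 n) hn hr1 hr2 hr3 hr4 n.toNat (by omega)
  rw [hmn, if_neg (show ¬ n < bdAltLoop n 1 n by nlinarith)] at hinv
  simp only [balanced_divisors, balanced_divisors_alt, hfold]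
  by_cases hre : bdAltLoop n 1 n = 1
  · rw [if_pos hre] at hinv
    rw [hinv, hre]
    have h1 : PySem.Int.floordiv n n = 1 := by
      rw [PySem.Int.floordiv_eq_ediv_of_pos (by omega)]
      exact Int.ediv_self (by omega)
    have h2 : PySem.Int.floordiv n 1 = n := by
      rw [PySem.Int.floordiv_eq_ediv_of_pos (by omega)]
      exact Int.ediv_one n
    rw [h1, h2]
    rw [max_eq_left hn, min_eq_right hn, max_eq_right hn, min_eq_left hn]
  · rw [if_neg hre] at hinv
    rw [hinv]

-- for n < 0 both loops are skipped and the two programs are the same expression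
lemma bd_neg (n : Int) (hn : n < 0) : balanced_divisors n = balanced_divisors_alt n := by
  have hrange : PySem.List.pyRange 1 (n + 1) = [] := by
    refine List.eq_nil_iff_forall_not_mem.mpr fun x hx => ?_
    rw [PySem.List.mem_pyRange_one] at hx
    omega
  have halt : bdAltLoop n 1 n = n := by
    rw [bdAltLoop, dif_neg]
    rintro ⟨-, h⟩; omega
  simp only [balanced_divisors, balanced_divisors_alt, hrange, List.foldl_nil, halt]

-- ===== VERDICT (by name: the statement is the Claim_ definition above) =====
theorem balanced_divisors_spec : Claim_equal_balanced_divisors := by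
  intro n _ hpre
  unfold Spec_balanced_divisors
  rcases lt_trichotomy n 0 with h | h | h
  · exact bd_neg n h
  · exact absurd h hpre
  · exact bd_pos n (by omega)
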